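-- pv_equiv track=rewrite | github.com/jcolinpatrick/kryptos | scripts/blitz/blitz_8lines73.py | route_diagonal
-- ===== SOURCE A (Python) =====
-- def route_diagonal(text: str, nrows: int, ncols: int) -> str:
--     """Read text along diagonals (top-right to bottom-left)."""
--     grid = []
--     idx = 0
--     for r in range(nrows):
--         row = []
--         for c in range(ncols):
--             if idx < len(text):
--                 row.append(text[idx])
--                 idx += 1
--             else:
--                 row.append("")
--         grid.append(row)
--
--     result = []
--     for d in range(nrows + ncols - 1):
--         for r in range(nrows):
--             c = d - r
--             if 0 <= c < ncols and grid[r][c]: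
--                 result.append(grid[r][c])
--     return "".join(result)
-- ===== SOURCE B (Python) =====
-- def route_diagonal(text: str, nrows: int, ncols: int) -> str:
--     """Read text along diagonals (top-right to bottom-left)."""
--     if nrows <= 0 or ncols <= 0:
--         return ""
--     buckets = [[] for _ in range(nrows + ncols - 1)]
--     for i, ch in enumerate(text[:nrows * ncols]):
--         r, c = divmod(i, ncols)
--         buckets[r + c].append(ch)
--     return "".join("".join(b) for b in buckets)
-- ===== Notes on version B (the rewrite author's own statement) =====
-- stated objective: alternative
-- what changed: B drops the intermediate grid and the per-diagonal scan over all rows: one forward pass over the text buckets each character by its diagonal key r+c (via divmod), then joins the buckets.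
import Mathlib
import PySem

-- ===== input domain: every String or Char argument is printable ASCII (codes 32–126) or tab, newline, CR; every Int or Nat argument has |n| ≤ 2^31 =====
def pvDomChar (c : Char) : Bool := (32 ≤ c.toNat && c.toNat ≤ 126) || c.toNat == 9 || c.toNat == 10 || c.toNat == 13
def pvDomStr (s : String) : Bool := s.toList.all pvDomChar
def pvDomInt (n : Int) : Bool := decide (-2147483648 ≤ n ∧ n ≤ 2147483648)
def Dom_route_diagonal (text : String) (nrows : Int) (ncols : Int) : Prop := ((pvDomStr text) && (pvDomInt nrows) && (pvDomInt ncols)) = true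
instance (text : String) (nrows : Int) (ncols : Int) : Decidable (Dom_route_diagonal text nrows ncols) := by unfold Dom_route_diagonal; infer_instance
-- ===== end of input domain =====

-- B drops the intermediate grid and the per-diagonal scan over all rows: one forward pass
-- buckets each character by its diagonal key r+c, then joins the buckets.

-- ===== PORT A =====
-- grid cells: Python keeps 1-char strings or "" (falsy); ported as Option Char (none = "")
def route_diagonal (text : String) (nrows : Int) (ncols : Int) : String :=
  let chars := text.toList
  let built := (PySem.List.pyRange 0 nrows 1).foldl
    (fun (st : List (List (Option Char)) × Int) _r =>
      let inner := (PySem.List.pyRange 0 ncols 1).foldl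
        (fun (st2 : List (Option Char) × Int) _c =>
          if st2.2 < PySem.List.len chars then
            (st2.1 ++ [PySem.List.pyGet? chars st2.2], st2.2 + 1)
          else
            (st2.1 ++ [none], st2.2))
        ([], st.2)
      (st.1 ++ [inner.1], inner.2))
    ([], 0)
  let grid := built.1
  let result := (PySem.List.pyRange 0 (nrows + ncols - 1) 1).foldl
    (fun res d =>
      (PySem.List.pyRange 0 nrows 1).foldl
        (fun res r =>
          let c := d - r
          if 0 ≤ c ∧ c < ncols then
            -- Python indexes grid[r][c] only after the bound check; indices are in range here
            match PySem.List.pyGetD (PySem.List.pyGetD grid r []) c none with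
            | some ch => res ++ [ch]
            | none => res
          else res)
        res)
    []
  String.ofList result

-- ===== PORT B =====
def route_diagonal_alt (text : String) (nrows : Int) (ncols : Int) : String :=
  if nrows ≤ 0 ∨ ncols ≤ 0 then ""
  else
    let chars := text.toList
    let buckets0 : List (List Char) := List.replicate (nrows + ncols - 1).toNat []
    let buckets := (PySem.List.enumerate (PySem.List.slice chars none (some (nrows * ncols)))).foldl
      (fun (bs : List (List Char)) p =>
        -- buckets[r + c].append(ch): r + c is nonnegative and < len(buckets), so .toNat is exact
        bs.modify ((PySem.Int.floordiv p.1 ncols + PySem.Int.mod p.1 ncols).toNat) (fun b => b ++ [p.2]))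
      buckets0
    String.ofList buckets.flatten

-- ===== PRECONDITION & SPEC =====
def Spec_route_diagonal (text : String) (nrows : Int) (ncols : Int) (out : String) : Prop := out = route_diagonal_alt text nrows ncols
instance (text : String) (nrows : Int) (ncols : Int) (out : String) : Decidable (Spec_route_diagonal text nrows ncols out) := by unfold Spec_route_diagonal; infer_instance

-- ===== CLAIM (what is proved, stated in full; the proofs are below) =====
def Claim_equal_route_diagonal : Prop := ∀ (text : String) (nrows : Int) (ncols : Int), Dom_route_diagonal text nrows ncols → Spec_route_diagonal text nrows ncols (route_diagonal text nrows ncols)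

-- ===== LEMMAS AND PROOFS =====

-- the common canonical value: per diagonal d, the chars at flat index r*nc+(d-r), r increasing
def pvDiag (chars : List Char) (nr nc d : ℕ) : List Char :=
  ((List.range nr).filter
      (fun r => decide ((r ≤ d ∧ d - r < nc) ∧ r * nc + (d - r) < chars.length))).map
    (fun r => chars.getD (r * nc + (d - r)) ' ')

def pvDiags (chars : List Char) (nr nc : ℕ) : List Char :=
  ((List.range (nr + nc - 1)).map (pvDiag chars nr nc)).flatten

theorem pvA_row (chars : List Char) (nc : ℕ) : ∀ (i0 : ℕ), i0 ≤ chars.length →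
    ∀ (row0 : List (Option Char)),
    (PySem.List.pyRange 0 (nc : Int) 1).foldl
      (fun (st2 : List (Option Char) × Int) _c =>
        if st2.2 < PySem.List.len chars then
          (st2.1 ++ [PySem.List.pyGet? chars st2.2], st2.2 + 1)
        else
          (st2.1 ++ [none], st2.2))
      (row0, (i0 : ℤ))
    = (row0 ++ (List.range nc).map (fun c => chars[i0 + c]?),
       ((min (i0 + nc) chars.length : ℕ) : ℤ)) := by
  induction nc with
  | zero => intro i0 h row0; simp [PySem.List.pyRange_one_eq_nil, Nat.min_eq_left h]
  | succ n ih =>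
    intro i0 h row0
    have hsplit : (((n:ℕ)+1 : ℕ) : ℤ) = (n : ℤ) + 1 := by push_cast; ring
    rw [hsplit, PySem.List.pyRange_one_succ_right (by positivity), List.foldl_append, ih i0 h row0]
    simp only [List.foldl_cons, List.foldl_nil, PySem.List.len_eq, List.range_succ, List.map_append,
      List.map_cons, List.map_nil]
    by_cases hlt : i0 + n < chars.length
    · rw [if_pos (by exact_mod_cast by omega)]
      have hmin : (min (i0 + n) chars.length) = i0 + n := by omega
      rw [hmin]
      refine Prod.ext ?_ ?_
      · show _ ++ _ ++ [PySem.List.pyGet? chars ((i0+n : ℕ) : ℤ)] = _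
        rw [PySem.List.pyGet?_natCast, List.append_assoc]
      · simp only []
        push_cast
        omega
    · rw [if_neg (by push_cast; omega)]
      refine Prod.ext ?_ ?_
      · have : chars[i0 + n]? = none := by
          apply List.getElem?_eq_none
          omega
        simp [this, List.append_assoc]
      · simp only []
        push_cast
        omega

theorem pvA_grid (chars : List Char) (nc : ℕ) : ∀ (nr : ℕ),
    ((PySem.List.pyRange 0 (nr : Int) 1).foldl
      (fun (st : List (List (Option Char)) × Int) _r =>
        let inner := (PySem.List.pyRange 0 (nc : Int) 1).foldl
          (fun (st2 : List (Option Char) × Int) _c =>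
            if st2.2 < PySem.List.len chars then
              (st2.1 ++ [PySem.List.pyGet? chars st2.2], st2.2 + 1)
            else
              (st2.1 ++ [none], st2.2))
          ([], st.2)
        (st.1 ++ [inner.1], inner.2))
      ([], 0))
    = ((List.range nr).map (fun r => (List.range nc).map (fun c => chars[r * nc + c]?)),
       ((min (nr * nc) chars.length : ℕ) : ℤ)) := by
  intro nr
  induction nr with
  | zero => simp [PySem.List.pyRange_one_eq_nil]
  | succ n ih =>
    rw [show (((n:ℕ)+1 : ℕ) : ℤ) = (n : ℤ) + 1 by omega,
      PySem.List.pyRange_one_succ_right (by positivity), List.foldl_append, ih]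
    simp only [List.foldl_cons, List.foldl_nil]
    rw [pvA_row chars nc (min (n * nc) chars.length) (by omega) []]
    refine Prod.ext ?_ ?_
    · show _ ++ [_] = _
      rw [List.range_succ, List.map_append, List.map_cons, List.map_nil]
      congr 2
      · apply List.map_congr_left
        intro c _
        by_cases hm : n * nc ≤ chars.length
        · rw [Nat.min_eq_left hm]
        · rw [Nat.min_eq_right (by omega)]
          rw [List.getElem?_eq_none (by omega), List.getElem?_eq_none (by nlinarith)]
    · show ((min (min (n * nc) chars.length + nc) chars.length : ℕ) : ℤ) = _
      congr 1
      have : (n+1) * nc = n * nc + nc := by ring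
      omega

theorem pvB_fold_modify (key : ℕ → ℕ) (val : ℕ → Char) : ∀ (l : List ℕ) (bs : List (List Char)),
    l.foldl (fun bs x => bs.modify (key x) (fun b => b ++ [val x])) bs
    = bs.mapIdx (fun d b => b ++ ((l.filter (fun x => key x = d)).map val)) := by
  intro l
  induction l with
  | nil => intro bs; simp [List.mapIdx_eq_zipIdx_map]
  | cons x t ih =>
    intro bs
    rw [List.foldl_cons, ih]
    apply List.ext_getElem
    · simp
    · intro d h1 h2
      rw [List.getElem_mapIdx, List.getElem_mapIdx, List.getElem_modify]
      by_cases hk : key x = d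
      · rw [if_pos hk, List.filter_cons_of_pos (by simp [hk]), List.map_cons, List.append_assoc]
        simp
      · rw [if_neg hk, List.filter_cons_of_neg (by simp [hk])]

theorem pvA_deg (text : String) (nrows ncols : Int) (h : nrows ≤ 0 ∨ ncols ≤ 0) :
    route_diagonal text nrows ncols = "" := by
  unfold route_diagonal
  dsimp only
  rcases h with h | h
  · rw [PySem.List.pyRange_one_eq_nil h]
    simp only [List.foldl_nil]
    rw [PySem.List.foldl_ignore]
  · have hin : ∀ (grid : List (List (Option Char))) (d : ℤ) (res : List Char),
        (PySem.List.pyRange 0 nrows 1).foldl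
          (fun res r =>
            if 0 ≤ d - r ∧ d - r < ncols then
              match PySem.List.pyGetD (PySem.List.pyGetD grid r []) (d - r) none with
              | some ch => res ++ [ch]
              | none => res
            else res) res = res := by
      intro grid d res
      rw [PySem.List.foldl_congr_mem (g := fun res _ => res)]
      · exact PySem.List.foldl_ignore _ _
      · intro acc x _
        rw [if_neg (by omega)]
    simp only [hin]
    rw [PySem.List.foldl_ignore]

theorem pv_flatMap_if (l : List ℕ) (p : ℕ → Prop) [DecidablePred p] (f : ℕ → Char) :
    l.flatMap (fun x => if p x then [f x] else []) = (l.filter (fun x => decide (p x))).map f := by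
  induction l with
  | nil => simp
  | cons x t ih =>
    by_cases hp : p x
    · simp [hp, ih]
    · simp [hp, ih]

theorem pvA_pos (text : String) (nrows ncols : Int) (hr : 0 < nrows) (hc : 0 < ncols) :
    route_diagonal text nrows ncols
    = String.ofList (pvDiags text.toList nrows.toNat ncols.toNat) := by
  have hnr : ((nrows.toNat : ℤ)) = nrows := Int.toNat_of_nonneg hr.le
  have hnc : ((ncols.toNat : ℤ)) = ncols := Int.toNat_of_nonneg hc.le
  set nr := nrows.toNat with hnrdef
  set nc := ncols.toNat with hncdef
  set chars := text.toList with hchars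
  unfold route_diagonal
  dsimp only
  rw [← hnr, ← hnc]
  rw [pvA_grid chars nc nr]
  dsimp only
  set G : List (List (Option Char)) :=
    (List.range nr).map (fun r => (List.range nc).map (fun c => chars[r * nc + c]?)) with hG
  have hinner : ∀ (d : ℤ) (res : List Char),
      List.foldl
        (fun res r =>
          if 0 ≤ d - r ∧ d - r < (nc : ℤ) then
            match PySem.List.pyGetD (PySem.List.pyGetD G r []) (d - r) none with
            | some ch => res ++ [ch]
            | none => res
          else res)
        res (PySem.List.pyRange 0 (nr : ℤ))
      = res ++ (PySem.List.pyRange 0 (nr : ℤ)).flatMap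
          (fun r => if 0 ≤ d - r ∧ d - r < (nc : ℤ) then
              (PySem.List.pyGetD (PySem.List.pyGetD G r []) (d - r) none).toList
            else []) := by
    intro d res
    rw [PySem.List.foldl_congr_mem _ _
      (fun res r => res ++ (if 0 ≤ d - r ∧ d - r < (nc : ℤ) then
          (PySem.List.pyGetD (PySem.List.pyGetD G r []) (d - r) none).toList
        else [])) res ?_]
    · exact PySem.List.foldl_append_eq_flatMap _ _ _
    · intro acc x _
      by_cases h : 0 ≤ d - x ∧ d - x < (nc : ℤ)
      · simp only [if_pos h]
        cases hx : PySem.List.pyGetD (PySem.List.pyGetD G x []) (d - x) none <;> simp_all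
      · simp only [if_neg h, List.append_nil]
  simp only [hinner]
  rw [PySem.List.foldl_append_eq_flatMap, List.nil_append]
  have h1nr : 1 ≤ nr := by omega
  have h1nc : 1 ≤ nc := by omega
  have hD : ((nr : ℤ) + (nc : ℤ) - 1) = ((nr + nc - 1 : ℕ) : ℤ) := by push_cast; omega
  rw [hD, PySem.List.pyRange_zero_natCast (nr + nc - 1), PySem.List.pyRange_zero_natCast nr,
    List.flatMap_map]
  unfold pvDiags
  rw [← List.flatMap_def]
  congr 1
  apply List.flatMap_congr
  intro d _
  rw [List.flatMap_map]
  have hstep : ∀ rN ∈ List.range nr,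
      (if 0 ≤ (d : ℤ) - (rN : ℤ) ∧ (d : ℤ) - (rN : ℤ) < (nc : ℤ) then
          (PySem.List.pyGetD (PySem.List.pyGetD G (rN : ℤ) []) ((d : ℤ) - (rN : ℤ)) none).toList
        else [])
      = (if (rN ≤ d ∧ d - rN < nc) ∧ rN * nc + (d - rN) < chars.length then
          [chars.getD (rN * nc + (d - rN)) ' '] else []) := by
    intro rN hrN
    rw [List.mem_range] at hrN
    by_cases hcond : rN ≤ d ∧ d - rN < nc
    · rw [if_pos (by omega)]
      have hrow : PySem.List.pyGetD G (rN : ℤ) [] = (List.range nc).map (fun c => chars[rN * nc + c]?) := by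
        rw [PySem.List.pyGetD_natCast, hG,
          List.getD_eq_getElem _ _ (by simpa using hrN), List.getElem_map, List.getElem_range]
      have hdr : ((d : ℤ) - (rN : ℤ)) = ((d - rN : ℕ) : ℤ) := by push_cast; omega
      rw [hrow, hdr, PySem.List.pyGetD_natCast,
        List.getD_eq_getElem _ _ (by simp; omega), List.getElem_map, List.getElem_range]
      by_cases hb : rN * nc + (d - rN) < chars.length
      · rw [if_pos ⟨hcond, hb⟩, List.getElem?_eq_getElem hb, List.getD_eq_getElem _ _ hb]
        rfl
      · rw [if_neg (by tauto), List.getElem?_eq_none (by omega)]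
        rfl
    · rw [if_neg (by omega), if_neg (by tauto)]
  rw [List.flatMap_congr hstep, pv_flatMap_if (List.range nr)
    (fun rN => (rN ≤ d ∧ d - rN < nc) ∧ rN * nc + (d - rN) < chars.length)
    (fun rN => chars.getD (rN * nc + (d - rN)) ' ')]
  rfl

theorem pv_mapIdx_replicate (D : ℕ) (f : ℕ → List Char) :
    (List.replicate D ([] : List Char)).mapIdx (fun d b => b ++ f d) = (List.range D).map f := by
  apply List.ext_getElem
  · simp
  · intro d h1 h2
    simp [List.getElem_mapIdx]

theorem pvB_pos (text : String) (nrows ncols : Int) (hr : 0 < nrows) (hc : 0 < ncols) :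
    route_diagonal_alt text nrows ncols
    = String.ofList
        (((List.range (nrows.toNat + ncols.toNat - 1)).map
          (fun d =>
            (((List.range (min (nrows.toNat * ncols.toNat) text.toList.length)).filter
                (fun i => i / ncols.toNat + i % ncols.toNat = d)).map
              (fun i => text.toList.getD i ' ')))).flatten) := by
  have hnr : ((nrows.toNat : ℤ)) = nrows := Int.toNat_of_nonneg hr.le
  have hnc : ((ncols.toNat : ℤ)) = ncols := Int.toNat_of_nonneg hc.le
  set nr := nrows.toNat with hnrdef
  set nc := ncols.toNat with hncdef
  set chars := text.toList with hchars
  have h1nr : 1 ≤ nr := by omega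
  have h1nc : 1 ≤ nc := by omega
  set limit := min (nr * nc) chars.length with hlimit
  unfold route_diagonal_alt
  rw [if_neg (by omega)]
  dsimp only
  rw [← hnr, ← hnc]
  rw [show ((nr : ℤ) * (nc : ℤ)) = ((nr * nc : ℕ) : ℤ) by push_cast; ring,
    PySem.List.slice_to_natCast]
  rw [PySem.List.enumerate_eq_map_pyRange (chars.take (nr * nc)) ' ']
  rw [show PySem.List.len (chars.take (nr * nc)) = ((limit : ℕ) : ℤ) by
    simp [PySem.List.len_eq, hlimit]]
  rw [PySem.List.pyRange_zero_natCast limit, List.foldl_map, List.foldl_map]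
  rw [PySem.List.foldl_congr_mem _ _
    (fun (bs : List (List Char)) (k : ℕ) =>
      bs.modify (k / nc + k % nc) (fun b => b ++ [(chars.take (nr * nc)).getD k ' '])) _ ?_]
  · rw [pvB_fold_modify (fun k => k / nc + k % nc)
      (fun k => (chars.take (nr * nc)).getD k ' ') (List.range limit)]
    rw [show ((nr : ℤ) + (nc : ℤ) - 1).toNat = nr + nc - 1 by omega]
    rw [pv_mapIdx_replicate]
    congr 2
    apply List.map_congr_left
    intro d _
    apply List.map_congr_left
    intro k hk
    rw [List.mem_filter, List.mem_range] at hk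
    have hk1 : k < (chars.take (nr * nc)).length := by
      rw [List.length_take]; omega
    rw [List.getD_eq_getElem _ _ hk1, List.getElem_take, List.getD_eq_getElem _ _ (by omega)]
  · intro acc k _
    simp only [PySem.Int.floordiv_natCast, PySem.Int.mod_natCast, PySem.List.pyGetD_natCast,
      ← Nat.cast_add, Int.toNat_natCast]

theorem pvDiag_eq (chars : List Char) (nr nc d : ℕ) (hnc : 0 < nc) :
    ((List.range (min (nr * nc) chars.length)).filter
        (fun i => i / nc + i % nc = d)).map (fun i => chars.getD i ' ')
    = pvDiag chars nr nc d := by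
  have hlist : (List.range (min (nr * nc) chars.length)).filter (fun i => i / nc + i % nc = d)
      = ((List.range nr).filter
          (fun r => decide ((r ≤ d ∧ d - r < nc) ∧ r * nc + (d - r) < chars.length))).map
        (fun r => r * nc + (d - r)) := by
    have pw1 : ((List.range (min (nr * nc) chars.length)).filter
        (fun i => i / nc + i % nc = d)).Pairwise (· < ·) :=
      List.Pairwise.filter _ List.pairwise_lt_range
    have pwQ : ((List.range nr).filter
        (fun r => decide ((r ≤ d ∧ d - r < nc) ∧ r * nc + (d - r) < chars.length))).Pairwise
        (fun a b => a * nc + (d - a) < b * nc + (d - b)) := by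
      rw [List.pairwise_filter]
      refine List.pairwise_lt_range.imp ?_
      intro a b hab hqa hqb
      rw [decide_eq_true_eq] at hqa hqb
      have h1 : a * nc + nc ≤ b * nc := by
        have := Nat.mul_le_mul_right nc (show a + 1 ≤ b by omega)
        simpa [Nat.succ_mul] using this
      omega
    have pw2 : (((List.range nr).filter
        (fun r => decide ((r ≤ d ∧ d - r < nc) ∧ r * nc + (d - r) < chars.length))).map
        (fun r => r * nc + (d - r))).Pairwise (· < ·) := by
      rw [List.pairwise_map]
      exact pwQ
    have nd1 := List.Nodup.filter (fun i => decide (i / nc + i % nc = d))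
      (List.nodup_range (n := min (nr * nc) chars.length))
    have nd2 : (((List.range nr).filter
        (fun r => decide ((r ≤ d ∧ d - r < nc) ∧ r * nc + (d - r) < chars.length))).map
        (fun r => r * nc + (d - r))).Nodup :=
      pw2.imp (fun h => Nat.ne_of_lt h)
    have hperm : ((List.range (min (nr * nc) chars.length)).filter
        (fun i => i / nc + i % nc = d)).Perm
        (((List.range nr).filter
          (fun r => decide ((r ≤ d ∧ d - r < nc) ∧ r * nc + (d - r) < chars.length))).map
          (fun r => r * nc + (d - r))) := by
      rw [List.perm_ext_iff_of_nodup nd1 nd2]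
      intro x
      simp only [List.mem_filter, List.mem_range, List.mem_map, decide_eq_true_eq]
      constructor
      · rintro ⟨hx, hkey⟩
        have hxm : x < nr * nc ∧ x < chars.length := ⟨by omega, by omega⟩
        have hdm : nc * (x / nc) + x % nc = x := Nat.div_add_mod x nc
        have hdm' : x / nc * nc + x % nc = x := by rw [Nat.mul_comm] at hdm; exact hdm
        have hml : x % nc < nc := Nat.mod_lt x hnc
        have hrlt : x / nc < nr := (Nat.div_lt_iff_lt_mul hnc).mpr hxm.1
        refine ⟨x / nc, ⟨hrlt, ⟨⟨by omega, by omega⟩, by omega⟩⟩, by omega⟩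
      · rintro ⟨r, ⟨hr, ⟨⟨hrd, hcnc⟩, hbound⟩⟩, hxeq⟩
        have h2 : r * nc + nc ≤ nr * nc := by
          have := Nat.mul_le_mul_right nc (show r + 1 ≤ nr by omega)
          simpa [Nat.succ_mul] using this
        have hx' : x = d - r + r * nc := by omega
        have hdiv : (d - r + r * nc) / nc = r := by
          rw [Nat.add_mul_div_right _ _ hnc, Nat.div_eq_of_lt hcnc, Nat.zero_add]
        have hmod : (d - r + r * nc) % nc = d - r := by
          rw [Nat.add_mul_mod_self_right, Nat.mod_eq_of_lt hcnc]
        constructor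
        · omega
        · rw [hx', hdiv, hmod]; omega
    exact List.eq_of_perm_of_sorted
      (fun a b _ _ h1 h2 => ((Nat.lt_asymm h1) h2).elim) pw1 pw2 hperm
  rw [hlist, List.map_map]
  rfl

-- ===== VERDICT (by name: the statement is the Claim_ definition above) =====
theorem route_diagonal_spec : Claim_equal_route_diagonal := by
  intro text nrows ncols _
  unfold Spec_route_diagonal
  rcases le_or_gt nrows 0 with h | hr
  · rw [pvA_deg text nrows ncols (Or.inl h)]
    unfold route_diagonal_alt
    rw [if_pos (Or.inl h)]
  · rcases le_or_gt ncols 0 with h | hc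
    · rw [pvA_deg text nrows ncols (Or.inr h)]
      unfold route_diagonal_alt
      rw [if_pos (Or.inr h)]
    · rw [pvA_pos text nrows ncols hr hc, pvB_pos text nrows ncols hr hc]
      unfold pvDiags
      congr 2
      apply List.map_congr_left
      intro d _
      rw [pvDiag_eq text.toList nrows.toNat ncols.toNat d (by omega)]
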